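-- pv_equiv track=rewrite | github.com/masorange/titan-cli | plugins/titan-plugin-github/titan_plugin_github/operations/code_review_operations.py | extract_doc_summary
-- ===== SOURCE A (Python) =====
-- from typing import Any, Dict, List, Optional, Tuple
--
-- _SUMMARY_HEADING_KEYWORDS = {
--     "summary", "overview", "introduction", "about", "description",
--     "resumen", "introducción", "descripción",
-- }
--
-- def extract_doc_summary(content: str, max_chars: int = 2000) -> str:
--     """
--     Extract an introductory summary from a doc file for AI context.
--
--     Strategy (in order):
--     1. If a known summary-like heading (## Summary, ## Overview, etc.) exists,
--        extract only that section.
--     2. Otherwise, return the first max_chars characters of the document.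
--
--     This is robust to any doc structure regardless of authoring tool.
--     """
--     lines = content.split("\n")
--     in_summary_section = False
--     summary_lines: List[str] = []
--
--     for line in lines:
--         if line.startswith("## "):
--             heading_text = line[3:].strip().lower().rstrip(":")
--             if heading_text in _SUMMARY_HEADING_KEYWORDS:
--                 in_summary_section = True
--                 summary_lines.append(line)
--                 continue
--             elif in_summary_section:
--                 break  # End of the summary section
--
--         if in_summary_section:
--             summary_lines.append(line)
--
--     if summary_lines:
--         result = "\n".join(summary_lines).strip()
--         if len(result) > max_chars:
--             result = result[:max_chars] + "\n... (truncated)"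
--         return result
--
--     # Fallback: plain truncation — works for any structure
--     if len(content) <= max_chars:
--         return content
--     return content[:max_chars] + "\n... (truncated)"
-- ===== SOURCE B (Python) =====
-- from itertools import dropwhile, takewhile
--
-- _SUMMARY_HEADING_KEYWORDS = {
--     "summary", "overview", "introduction", "about", "description",
--     "resumen", "introducción", "descripción",
-- }
--
--
-- def _blocks(lines):
--     """Group the document into heading-led blocks ('## ' line plus the lines
--     under it); lines before the first heading are dropped — they can never
--     belong to a summary section."""
--     blocks = []
--     current = None
--     for line in lines:
--         if line.startswith("## "):
--             if current is not None:
--                 blocks.append(current)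
--             current = [line]
--         elif current is not None:
--             current.append(line)
--     if current is not None:
--         blocks.append(current)
--     return blocks
--
--
-- def _is_summary_block(block):
--     return block[0][3:].strip().lower().rstrip(":") in _SUMMARY_HEADING_KEYWORDS
--
--
-- def _truncate(text, max_chars):
--     if len(text) <= max_chars:
--         return text
--     return text[:max_chars] + "\n... (truncated)"
--
--
-- def extract_doc_summary(content: str, max_chars: int = 2000) -> str:
--     blocks = _blocks(content.split("\n"))
--     section = list(takewhile(_is_summary_block,
--                              dropwhile(lambda b: not _is_summary_block(b), blocks)))
--     if not section:
--         return _truncate(content, max_chars)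
--     return _truncate(
--         "\n".join(line for block in section for line in block).strip(), max_chars)
-- ===== Notes on version B (the rewrite author's own statement) =====
-- stated objective: alternative
-- what changed: B first groups the document into heading-led blocks (a list-of-blocks data structure built in one grouping pass), then selects the summary section as dropwhile/takewhile over whole blocks and flattens it, instead of A's flag-driven line-by-line accumulating scan with a break.
import Mathlib
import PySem

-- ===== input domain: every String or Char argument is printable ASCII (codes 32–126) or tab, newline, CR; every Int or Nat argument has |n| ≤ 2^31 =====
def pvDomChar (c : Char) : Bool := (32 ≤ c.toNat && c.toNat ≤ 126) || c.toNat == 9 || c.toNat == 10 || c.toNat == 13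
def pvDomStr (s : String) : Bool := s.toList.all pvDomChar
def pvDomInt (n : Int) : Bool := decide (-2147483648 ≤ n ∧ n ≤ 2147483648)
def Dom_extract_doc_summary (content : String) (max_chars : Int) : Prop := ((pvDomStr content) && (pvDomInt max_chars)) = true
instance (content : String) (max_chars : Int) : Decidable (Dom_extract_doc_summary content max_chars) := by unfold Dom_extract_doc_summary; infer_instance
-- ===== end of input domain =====

-- B groups the document into heading-led blocks first and then selects the summary
-- section as dropWhile/takeWhile over whole blocks, instead of A's flag-driven
-- line-by-line accumulating scan (objective: alternative; same O(n) cost).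

-- s.rstrip(":") — exact hand port (PySem has no chars-argument rstrip): drop trailing ':' characters.
def pvRstripColon (s : String) : String :=
  String.ofList ((s.toList.reverse.dropWhile (· == ':')).reverse)

-- ===== PORT A =====
-- the module-level set _SUMMARY_HEADING_KEYWORDS (membership test only, ported as a list)
def pvKeywordsA : List String :=
  ["summary", "overview", "introduction", "about", "description",
   "resumen", "introducción", "descripción"]

-- line[3:].strip().lower().rstrip(":")
def pvNormA (line : String) : String :=
  pvRstripColon (PySem.Str.lower (PySem.Str.strip (PySem.Str.slice line (some 3) none)))

-- A's for-loop over lines with the in_summary_section flag and break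
def pvLoopA : List String → Bool → List String
  | [], _ => []
  | l :: rest, flag =>
    if PySem.Str.startswith l "## " then
      if pvKeywordsA.contains (pvNormA l) then
        l :: pvLoopA rest true            -- enter/stay in section, append heading, continue
      else if flag then []                -- break: end of the summary section
      else pvLoopA rest flag              -- falls through; not in section, line not appended
    else if flag then l :: pvLoopA rest flag
    else pvLoopA rest flag

def extract_doc_summary (content : String) (max_chars : Int) : String :=
  let lines := (PySem.Str.split? content "\n").getD []   -- sep = "\n" ≠ "", so split? is always some
  let summary_lines := pvLoopA lines false
  if summary_lines ≠ [] then
    let result := PySem.Str.strip (PySem.Str.join "\n" summary_lines)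
    if PySem.Str.len result > max_chars then
      PySem.Str.slice result none (some max_chars) ++ "\n... (truncated)"
    else result
  else
    if PySem.Str.len content ≤ max_chars then content
    else PySem.Str.slice content none (some max_chars) ++ "\n... (truncated)"

-- ===== PORT B =====
def pvKeywordsB : List String :=
  ["summary", "overview", "introduction", "about", "description",
   "resumen", "introducción", "descripción"]

def pvNormB (line : String) : String :=
  pvRstripColon (PySem.Str.lower (PySem.Str.strip (PySem.Str.slice line (some 3) none)))

-- _is_summary_block: block[0][3:].strip().lower().rstrip(":") in keywords
-- (blocks are built nonempty; the [] branch is just pattern-match totality)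
def pvIsSumBlock : List String → Bool
  | [] => false
  | h :: _ => pvKeywordsB.contains (pvNormB h)

-- _truncate
def pvTruncate (text : String) (max_chars : Int) : String :=
  if PySem.Str.len text ≤ max_chars then text
  else PySem.Str.slice text none (some max_chars) ++ "\n... (truncated)"

-- the body of _blocks' for-loop: state = (blocks, current)
def pvBlocksStep (st : List (List String) × Option (List String)) (line : String) :
    List (List String) × Option (List String) :=
  if PySem.Str.startswith line "## " then
    (match st.2 with
     | some c => st.1 ++ [c]
     | none => st.1,
     some [line])
  else
    match st.2 with
    | some c => (st.1, some (c ++ [line]))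
    | none => st

-- _blocks: the loop, then the trailing 'if current is not None: blocks.append(current)'
def pvBlocks (lines : List String) : List (List String) :=
  match lines.foldl pvBlocksStep ([], none) with
  | (bs, some c) => bs ++ [c]
  | (bs, none) => bs

def extract_doc_summary_alt (content : String) (max_chars : Int) : String :=
  let lines := (PySem.Str.split? content "\n").getD []
  let blocks := pvBlocks lines
  let sect := (blocks.dropWhile (fun b => !pvIsSumBlock b)).takeWhile pvIsSumBlock
  if sect.isEmpty then pvTruncate content max_chars
  else pvTruncate (PySem.Str.strip (PySem.Str.join "\n" sect.flatten)) max_chars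

-- ===== PRECONDITION & SPEC =====
def Spec_extract_doc_summary (content : String) (max_chars : Int) (out : String) : Prop := out = extract_doc_summary_alt content max_chars
instance (content : String) (max_chars : Int) (out : String) : Decidable (Spec_extract_doc_summary content max_chars out) := by unfold Spec_extract_doc_summary; infer_instance

-- ===== CLAIM (what is proved, stated in full; the proofs are below) =====
def Claim_equal_extract_doc_summary : Prop := ∀ (content : String) (max_chars : Int), Dom_extract_doc_summary content max_chars → Spec_extract_doc_summary content max_chars (extract_doc_summary content max_chars)

-- ===== LEMMAS AND PROOFS =====

-- the per-line summary-heading test (proof-side shorthand)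
def pvIsSumH (line : String) : Bool :=
  PySem.Str.startswith line "## " && pvKeywordsA.contains (pvNormA line)

-- the continuation predicate of A's summary section (not stop)
def pvCont (x : String) : Bool := !(PySem.Str.startswith x "## " && !pvIsSumH x)

theorem pvIsSumBlock_cons (l : String) (t : List String) :
    pvIsSumBlock (l :: t) = pvKeywordsA.contains (pvNormA l) := rfl

-- ---- generic takeWhile/dropWhile facts ----

theorem pv_tw_stop {α : Type} (q : α → Bool) (a : List α) (y : α) (b : List α)
    (hy : q y = false) : (a ++ y :: b).takeWhile q = a.takeWhile q := by
  induction a with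
  | nil => simp [hy]
  | cons x a ih => by_cases hx : q x = true <;> simp [hx, ih]

theorem pv_dw_stop {α : Type} (q : α → Bool) (a : List α) (y : α) (b : List α)
    (hy : q y = false) : (a ++ y :: b).dropWhile q = a.dropWhile q ++ y :: b := by
  induction a with
  | nil => simp [hy]
  | cons x a ih => by_cases hx : q x = true <;> simp [hx, ih]

theorem pv_tw_all {α : Type} (q : α → Bool) (a b : List α)
    (ha : ∀ x ∈ a, q x = true) : (a ++ b).takeWhile q = a ++ b.takeWhile q := by
  induction a with
  | nil => simp
  | cons x a ih =>
    have hx := ha x (List.mem_cons_self)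
    simp [hx, ih (fun z hz => ha z (List.mem_cons_of_mem _ hz))]

theorem pv_dw_all {α : Type} (q : α → Bool) (a b : List α)
    (ha : ∀ x ∈ a, q x = true) : (a ++ b).dropWhile q = b.dropWhile q := by
  induction a with
  | nil => simp
  | cons x a ih =>
    have hx := ha x (List.mem_cons_self)
    simp [hx, ih (fun z hz => ha z (List.mem_cons_of_mem _ hz))]

theorem pv_head_dw {α : Type} (q : α → Bool) (l : List α) (y : α) (r : List α)
    (h : l.dropWhile q = y :: r) : q y = false := by
  induction l with
  | nil => simp at h
  | cons x l ih =>
    by_cases hx : q x = true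
    · rw [List.dropWhile_cons, if_pos hx] at h; exact ih h
    · rw [List.dropWhile_cons, if_neg hx] at h
      cases h; simpa using hx

-- ---- A's loop characterised (as in the earlier proof) ----

theorem pvLoopA_nil_of_no_heading (xs : List String)
    (h : ∀ x ∈ xs, pvIsSumH x = false) : pvLoopA xs false = [] := by
  induction xs with
  | nil => rfl
  | cons l rest ih =>
    have hl := h l (List.mem_cons_self)
    have hrest : ∀ x ∈ rest, pvIsSumH x = false := fun x hx => h x (List.mem_cons_of_mem _ hx)
    unfold pvIsSumH at hl
    by_cases hs : PySem.Str.startswith l "## " = true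
    · have hk : pvKeywordsA.contains (pvNormA l) = false := by
        rw [hs, Bool.true_and] at hl; exact hl
      simp only [pvLoopA]
      rw [if_pos hs, if_neg (by rw [hk]; exact Bool.false_ne_true)]
      simpa using ih hrest
    · simp only [pvLoopA]
      rw [if_neg hs]
      simpa using ih hrest

theorem pvLoopA_skip (pre rest : List String)
    (h : ∀ x ∈ pre, pvIsSumH x = false) :
    pvLoopA (pre ++ rest) false = pvLoopA rest false := by
  induction pre with
  | nil => rfl
  | cons l pre' ih =>
    have hl := h l (List.mem_cons_self)
    have hpre : ∀ x ∈ pre', pvIsSumH x = false := fun x hx => h x (List.mem_cons_of_mem _ hx)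
    unfold pvIsSumH at hl
    rw [List.cons_append]
    by_cases hs : PySem.Str.startswith l "## " = true
    · have hk : pvKeywordsA.contains (pvNormA l) = false := by
        rw [hs, Bool.true_and] at hl; exact hl
      simp only [pvLoopA]
      rw [if_pos hs, if_neg (by rw [hk]; exact Bool.false_ne_true)]
      simpa using ih hpre
    · simp only [pvLoopA]
      rw [if_neg hs]
      simpa using ih hpre

theorem pvLoopA_true_eq_takeWhile (xs : List String) :
    pvLoopA xs true = xs.takeWhile pvCont := by
  induction xs with
  | nil => rfl
  | cons l rest ih =>
    by_cases hs : PySem.Str.startswith l "## " = true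
    · by_cases hk : pvKeywordsA.contains (pvNormA l) = true
      · have hsum : pvIsSumH l = true := by unfold pvIsSumH; rw [hs, hk]; rfl
        have hc : pvCont l = true := by unfold pvCont; rw [hsum, hs]; rfl
        simp only [pvLoopA]
        rw [if_pos hs, if_pos hk, ih, List.takeWhile_cons, if_pos hc]
      · have hk' : pvKeywordsA.contains (pvNormA l) = false := by simpa using hk
        have hsum : pvIsSumH l = false := by unfold pvIsSumH; rw [hs, hk']; rfl
        have hc : pvCont l = false := by unfold pvCont; rw [hsum, hs]; rfl
        simp only [pvLoopA]
        rw [if_pos hs, if_neg hk, if_pos trivial, List.takeWhile_cons,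
          if_neg (by rw [hc]; exact Bool.false_ne_true)]
    · have hs' : PySem.Str.startswith l "## " = false := by simpa using hs
      have hc : pvCont l = true := by unfold pvCont; rw [hs']; rfl
      simp only [pvLoopA]
      rw [if_neg hs, ih, List.takeWhile_cons, if_pos hc]
      simp

theorem pvLoopA_section (pre : List String) (l : String) (suf : List String)
    (hpre : ∀ x ∈ pre, pvIsSumH x = false) (hl : pvIsSumH l = true) :
    pvLoopA (pre ++ l :: suf) false = l :: suf.takeWhile pvCont := by
  rw [pvLoopA_skip pre _ hpre]
  unfold pvIsSumH at hl
  obtain ⟨hs, hk⟩ := Bool.and_eq_true_iff.mp hl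
  simp only [pvLoopA]
  rw [if_pos hs, if_pos hk, pvLoopA_true_eq_takeWhile]

-- ---- B's block grouping characterised ----

-- the heading test, wrapped so that pvBlocksRec's equations keep it opaque
def pvHd (x : String) : Bool := PySem.Str.startswith x "## "

-- recursive characterisation of _blocks
def pvBlocksRec : List String → List (List String)
  | [] => []
  | l :: rest =>
    if pvHd l then
      (l :: rest.takeWhile (fun x => !pvHd x)) ::
        pvBlocksRec (rest.dropWhile (fun x => !pvHd x))
    else pvBlocksRec rest
termination_by xs => xs.length
decreasing_by
  · have := List.length_dropWhile_le (fun x => !pvHd x) rest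
    simp only [List.length_cons]; omega
  · simp only [List.length_cons]; omega

theorem pvBlocksRec_nil : pvBlocksRec [] = [] := by simp [pvBlocksRec]

theorem pvBlocksRec_cons_pos (l : String) (rest : List String) (h : pvHd l = true) :
    pvBlocksRec (l :: rest) =
      (l :: rest.takeWhile (fun x => !pvHd x)) ::
        pvBlocksRec (rest.dropWhile (fun x => !pvHd x)) := by
  simp [pvBlocksRec, h]

theorem pvBlocksRec_cons_neg (l : String) (rest : List String) (h : pvHd l = false) :
    pvBlocksRec (l :: rest) = pvBlocksRec rest := by
  simp [pvBlocksRec, h]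

def pvFinish (st : List (List String) × Option (List String)) : List (List String) :=
  match st with
  | (bs, some c) => bs ++ [c]
  | (bs, none) => bs

theorem pvFoldl_some (lines : List String) : ∀ (bs : List (List String)) (c : List String),
    pvFinish (lines.foldl pvBlocksStep (bs, some c)) =
      bs ++ (c ++ lines.takeWhile (fun x => !pvHd x)) ::
        pvBlocksRec (lines.dropWhile (fun x => !pvHd x)) := by
  induction lines with
  | nil => intro bs c; simp [pvFinish, pvBlocksRec_nil]
  | cons l rest ih =>
    intro bs c
    by_cases h : PySem.Str.startswith l "## " = true
    · have hHd : pvHd l = true := h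
      have hstep : pvBlocksStep (bs, some c) l = (bs ++ [c], some [l]) := by
        unfold pvBlocksStep; rw [if_pos h]
      have hq : (!pvHd l) = false := by simp [hHd]
      rw [List.foldl_cons, hstep, ih, List.takeWhile_cons,
        if_neg (by rw [hq]; exact Bool.false_ne_true),
        List.dropWhile_cons, if_neg (by rw [hq]; exact Bool.false_ne_true),
        pvBlocksRec_cons_pos l rest hHd]
      simp
    · have hf : PySem.Str.startswith l "## " = false := Bool.eq_false_iff.mpr h
      have hHd : pvHd l = false := hf
      have hstep : pvBlocksStep (bs, some c) l = (bs, some (c ++ [l])) := by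
        unfold pvBlocksStep; rw [if_neg h]
      have hq : (!pvHd l) = true := by simp [hHd]
      rw [List.foldl_cons, hstep, ih, List.takeWhile_cons, if_pos hq,
        List.dropWhile_cons, if_pos hq]
      simp

theorem pvFoldl_none (lines : List String) : ∀ (bs : List (List String)),
    pvFinish (lines.foldl pvBlocksStep (bs, none)) = bs ++ pvBlocksRec lines := by
  induction lines with
  | nil => intro bs; simp [pvFinish, pvBlocksRec_nil]
  | cons l rest ih =>
    intro bs
    by_cases h : PySem.Str.startswith l "## " = true
    · have hHd : pvHd l = true := h
      have hstep : pvBlocksStep (bs, none) l = (bs, some [l]) := by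
        unfold pvBlocksStep; rw [if_pos h]
      rw [List.foldl_cons, hstep, pvFoldl_some, pvBlocksRec_cons_pos l rest hHd]
      simp
    · have hf : PySem.Str.startswith l "## " = false := Bool.eq_false_iff.mpr h
      have hHd : pvHd l = false := hf
      have hstep : pvBlocksStep (bs, none) l = (bs, none) := by
        unfold pvBlocksStep; rw [if_neg h]
      rw [List.foldl_cons, hstep, ih, pvBlocksRec_cons_neg l rest hHd]

theorem pvBlocks_eq (lines : List String) : pvBlocks lines = pvBlocksRec lines := by
  have h := pvFoldl_none lines []
  unfold pvBlocks
  unfold pvFinish at h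
  rcases hfold : lines.foldl pvBlocksStep ([], none) with ⟨bs, cur⟩
  rw [hfold] at h
  cases cur <;> simpa using h

theorem pvBlocksRec_append : ∀ (n : Nat) (pre : List String), pre.length ≤ n →
    ∀ (l : String) (suf : List String), pvHd l = true →
    pvBlocksRec (pre ++ l :: suf) = pvBlocksRec pre ++ pvBlocksRec (l :: suf) := by
  intro n
  induction n with
  | zero =>
    intro pre hlen l suf _
    cases pre with
    | nil => simp [pvBlocksRec_nil]
    | cons a t => exact absurd hlen (by simp)
  | succ n ih =>
    intro pre hlen l suf hl
    cases pre with
    | nil => simp [pvBlocksRec_nil]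
    | cons p pre' =>
      have hql : (!pvHd l) = false := by simp [hl]
      cases hp : pvHd p with
      | true =>
        rw [List.cons_append, pvBlocksRec_cons_pos p _ hp, pvBlocksRec_cons_pos p pre' hp,
          pv_tw_stop _ pre' l suf hql, pv_dw_stop _ pre' l suf hql,
          ih (pre'.dropWhile (fun x => !pvHd x))
            (by have := List.length_dropWhile_le (fun x => !pvHd x) pre'
                simp only [List.length_cons] at hlen; omega) l suf hl]
        simp
      | false =>
        rw [List.cons_append, pvBlocksRec_cons_neg p _ hp, pvBlocksRec_cons_neg p pre' hp,
          ih pre' (by simp only [List.length_cons] at hlen; omega) l suf hl]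

theorem pvBlocks_nonsum : ∀ (n : Nat) (xs : List String), xs.length ≤ n →
    (∀ x ∈ xs, pvIsSumH x = false) → ∀ b ∈ pvBlocksRec xs, pvIsSumBlock b = false := by
  intro n
  induction n with
  | zero =>
    intro xs hlen _
    cases xs with
    | nil => rw [pvBlocksRec_nil]; simp
    | cons a t => exact absurd hlen (by simp)
  | succ n ih =>
    intro xs hlen hall
    cases xs with
    | nil => rw [pvBlocksRec_nil]; simp
    | cons l rest =>
      by_cases hs : PySem.Str.startswith l "## " = true
      · have hHd : pvHd l = true := hs
        have hl := hall l (List.mem_cons_self)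
        unfold pvIsSumH at hl
        have hk : pvKeywordsA.contains (pvNormA l) = false := by
          rw [hs, Bool.true_and] at hl; exact hl
        intro b hb
        rw [pvBlocksRec_cons_pos l rest hHd] at hb
        rcases List.mem_cons.mp hb with rfl | hb
        · rw [pvIsSumBlock_cons, hk]
        · exact ih (rest.dropWhile (fun x => !pvHd x))
            (by have := List.length_dropWhile_le (fun x => !pvHd x) rest
                simp only [List.length_cons] at hlen; omega)
            (fun x hx => hall x (List.mem_cons_of_mem _
              ((List.dropWhile_sublist _).subset hx))) b hb
      · have hHd : pvHd l = false := Bool.eq_false_iff.mpr hs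
        intro b hb
        rw [pvBlocksRec_cons_neg l rest hHd] at hb
        exact ih rest (by simp only [List.length_cons] at hlen; omega)
          (fun x hx => hall x (List.mem_cons_of_mem _ hx)) b hb

-- the key correspondence: flattening the summary blocks = A's takeWhile pvCont
theorem pvKey : ∀ (n : Nat) (suf : List String), suf.length ≤ n →
    suf.takeWhile (fun x => !pvHd x) ++
      ((pvBlocksRec (suf.dropWhile (fun x => !pvHd x))).takeWhile pvIsSumBlock).flatten
      = suf.takeWhile pvCont := by
  intro n
  induction n with
  | zero =>
    intro suf hlen
    cases suf with
    | nil => simp [pvBlocksRec_nil]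
    | cons a t => exact absurd hlen (by simp)
  | succ n ih =>
    intro suf hlen
    cases hd : suf.dropWhile (fun x => !pvHd x) with
    | nil =>
      have hall : ∀ x ∈ suf, (!pvHd x) = true := by
        intro x hx
        exact List.dropWhile_eq_nil_iff.mp hd x hx
      have htw : suf.takeWhile (fun x => !pvHd x) = suf := by
        have := pv_tw_all (fun x => !pvHd x) suf [] hall
        simpa using this
      have htc : suf.takeWhile pvCont = suf := by
        have hc : ∀ x ∈ suf, pvCont x = true := by
          intro x hx
          have h1 := hall x hx
          have h2 : pvHd x = false := by simpa using h1
          unfold pvCont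
          rw [show PySem.Str.startswith x "## " = false from h2]; rfl
        have := pv_tw_all pvCont suf [] hc
        simpa using this
      rw [htw, htc, pvBlocksRec_nil]
      simp
    | cons m rest' =>
      have hmq : (!pvHd m) = false := pv_head_dw _ suf m rest' hd
      have hmHd : pvHd m = true := by simpa using hmq
      have hm : PySem.Str.startswith m "## " = true := hmHd
      have hsplit : suf.takeWhile (fun x => !pvHd x) ++ m :: rest' = suf := by
        rw [← hd]; exact List.takeWhile_append_dropWhile
      have hcontA : ∀ x ∈ suf.takeWhile (fun x => !pvHd x), pvCont x = true := by
        intro x hx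
        have h1 := List.mem_takeWhile_imp hx
        have h2 : pvHd x = false := by simpa using h1
        unfold pvCont
        rw [show PySem.Str.startswith x "## " = false from h2]; rfl
      have hrlen : rest'.length ≤ n := by
        have h1 : (suf.takeWhile (fun x => !pvHd x)).length
            + (m :: rest').length = suf.length := by
          rw [← List.length_append, hsplit]
        simp only [List.length_cons] at h1
        omega
      have htc : suf.takeWhile pvCont =
          suf.takeWhile (fun x => !pvHd x) ++ (m :: rest').takeWhile pvCont := by
        conv_lhs => rw [← hsplit]
        exact pv_tw_all pvCont _ _ hcontA
      rw [htc, pvBlocksRec_cons_pos m rest' hmHd]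
      by_cases hk : pvKeywordsA.contains (pvNormA m) = true
      · have hsum : pvIsSumH m = true := by unfold pvIsSumH; rw [hm, hk]; rfl
        have hcm : pvCont m = true := by unfold pvCont; rw [hsum, hm]; rfl
        have hib : pvIsSumBlock (m :: rest'.takeWhile (fun x => !pvHd x)) = true := by
          rw [pvIsSumBlock_cons, hk]
        rw [List.takeWhile_cons, if_pos hib, List.takeWhile_cons, if_pos hcm,
          List.flatten_cons, ← ih rest' hrlen]
        simp
      · have hk' : pvKeywordsA.contains (pvNormA m) = false := by simpa using hk
        have hsum : pvIsSumH m = false := by unfold pvIsSumH; rw [hm, hk']; rfl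
        have hcm : pvCont m = false := by unfold pvCont; rw [hsum, hm]; rfl
        have hib : pvIsSumBlock (m :: rest'.takeWhile (fun x => !pvHd x)) = false := by
          rw [pvIsSumBlock_cons, hk']
        rw [List.takeWhile_cons, if_neg (by rw [hib]; exact Bool.false_ne_true),
          List.takeWhile_cons, if_neg (by rw [hcm]; exact Bool.false_ne_true)]
        simp

-- ===== VERDICT (by name: the statement is the Claim_ definition above) =====
theorem extract_doc_summary_spec : Claim_equal_extract_doc_summary := by
  intro content max_chars _
  unfold Spec_extract_doc_summary extract_doc_summary extract_doc_summary_alt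
  set lines := (PySem.Str.split? content "\n").getD [] with hlines
  cases hrest : lines.dropWhile (fun x => !pvIsSumH x) with
  | nil =>
    have hall : ∀ x ∈ lines, pvIsSumH x = false := by
      intro x hx
      have h1 : (!pvIsSumH x) = true := List.dropWhile_eq_nil_iff.mp hrest x hx
      simpa using h1
    have hA : pvLoopA lines false = [] := pvLoopA_nil_of_no_heading lines hall
    have hdrop : (pvBlocksRec lines).dropWhile (fun b => !pvIsSumBlock b) = [] := by
      rw [List.dropWhile_eq_nil_iff]
      intro b hb
      have := pvBlocks_nonsum lines.length lines le_rfl hall b hb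
      simp [this]
    have hsect : ((([] : List (List String))).takeWhile pvIsSumBlock).isEmpty = true := rfl
    simp only [pvBlocks_eq, hA, hdrop, hsect, ne_eq, not_true_eq_false,
      if_false, if_true, pvTruncate]
  | cons l suf =>
    have hlq : (!pvIsSumH l) = false := pv_head_dw _ lines l suf hrest
    have hl : pvIsSumH l = true := by simpa using hlq
    have hstart : PySem.Str.startswith l "## " = true := (Bool.and_eq_true_iff.mp hl).1
    have hk : pvKeywordsA.contains (pvNormA l) = true := (Bool.and_eq_true_iff.mp hl).2
    have hpre : ∀ x ∈ lines.takeWhile (fun x => !pvIsSumH x), pvIsSumH x = false := by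
      intro x hx
      have h1 := List.mem_takeWhile_imp hx
      simpa using h1
    have hsplit : lines.takeWhile (fun x => !pvIsSumH x) ++ l :: suf = lines := by
      rw [← hrest]; exact List.takeWhile_append_dropWhile
    have hA : pvLoopA lines false = l :: suf.takeWhile pvCont := by
      conv_lhs => rw [← hsplit]
      exact pvLoopA_section _ l suf hpre hl
    have hblocks : pvBlocksRec lines =
        pvBlocksRec (lines.takeWhile (fun x => !pvIsSumH x)) ++ pvBlocksRec (l :: suf) := by
      conv_lhs => rw [← hsplit]
      exact pvBlocksRec_append _ _ le_rfl l suf (show pvHd l = true from hstart)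
    have hib : pvIsSumBlock (l :: suf.takeWhile (fun x => !pvHd x)) = true := by
      rw [pvIsSumBlock_cons, hk]
    have hsec : ((pvBlocksRec lines).dropWhile (fun b => !pvIsSumBlock b)).takeWhile
        pvIsSumBlock =
        (l :: suf.takeWhile (fun x => !pvHd x)) ::
          (pvBlocksRec (suf.dropWhile (fun x => !pvHd x))).takeWhile pvIsSumBlock := by
      rw [hblocks,
        pv_dw_all _ _ _ (fun b hb => by
          have := pvBlocks_nonsum _ _ le_rfl hpre b hb
          simp [this]),
        pvBlocksRec_cons_pos l suf (show pvHd l = true from hstart),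
        List.dropWhile_cons, if_neg (by rw [hib]; exact Bool.false_ne_true),
        List.takeWhile_cons, if_pos hib]
    have hflat : ((l :: suf.takeWhile (fun x => !pvHd x)) ::
        (pvBlocksRec (suf.dropWhile (fun x => !pvHd x))).takeWhile pvIsSumBlock).flatten
        = l :: suf.takeWhile pvCont := by
      rw [List.flatten_cons, ← pvKey suf.length suf le_rfl]
      simp
    have hemp : ¬(((l :: suf.takeWhile (fun x => !pvHd x)) ::
        (pvBlocksRec (suf.dropWhile (fun x => !pvHd x))).takeWhile pvIsSumBlock).isEmpty
        = true) := by simp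
    simp only [pvBlocks_eq, hA, hsec, hflat]
    rw [if_pos (List.cons_ne_nil _ _), if_neg hemp]
    unfold pvTruncate
    by_cases hle : PySem.Str.len (PySem.Str.strip
        (PySem.Str.join "\n" (l :: suf.takeWhile pvCont))) ≤ max_chars
    · rw [if_neg (show ¬ PySem.Str.len (PySem.Str.strip
          (PySem.Str.join "\n" (l :: suf.takeWhile pvCont))) > max_chars from not_lt.mpr hle),
        if_pos hle]
    · rw [if_pos (show PySem.Str.len (PySem.Str.strip
          (PySem.Str.join "\n" (l :: suf.takeWhile pvCont))) > max_chars from lt_of_not_ge hle),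
        if_neg hle]
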